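-- pv_equiv track=rewrite | github.com/kenmalik/advent-of-code-2025 | day_03/solution.py | max_pair
-- ===== SOURCE A (Python) =====
-- def max_pair(bank: str):
--     l, r = len(bank) - 2, len(bank) - 1
--
--     for i in range(len(bank) - 3, -1, -1):
--         if bank[i] >= bank[l]:
--             if bank[l] > bank[r]:
--                 r = l
--             l = i
--
--     return int(bank[l] + bank[r])
-- ===== SOURCE B (Python) =====
-- def max_pair(bank: str):
--     best = bank[len(bank) - 2] + bank[len(bank) - 1]
--     maxd = bank[0]
--
--     for j in range(1, len(bank)):
--         cand = maxd + bank[j]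
--         if cand > best:
--             best = cand
--         if bank[j] > maxd:
--             maxd = bank[j]
--
--     return int(best)
-- ===== Notes on version B (the rewrite author's own statement) =====
-- stated objective: alternative
-- what changed: A scans backwards tracking two candidate index positions; B is a single forward pass that keeps a running maximum character and the best two-character candidate string (compared lexicographically, as Python compares strings), seeded with the last two characters.
import Mathlib
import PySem

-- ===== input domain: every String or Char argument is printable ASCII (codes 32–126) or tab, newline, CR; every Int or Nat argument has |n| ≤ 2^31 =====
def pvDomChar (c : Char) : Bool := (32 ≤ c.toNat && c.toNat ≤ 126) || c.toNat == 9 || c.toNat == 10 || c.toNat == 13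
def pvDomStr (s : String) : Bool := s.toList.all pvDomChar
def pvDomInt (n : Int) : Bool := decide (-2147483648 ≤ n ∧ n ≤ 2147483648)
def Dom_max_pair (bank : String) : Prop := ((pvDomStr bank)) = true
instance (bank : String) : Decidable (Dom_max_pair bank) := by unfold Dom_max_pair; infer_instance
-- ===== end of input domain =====

-- B is a single forward pass keeping a running maximum character and the best candidate
-- two-character string (compared as Python compares strings) instead of A's backward scan
-- over two tracked index variables; same return value wherever A returns.

-- ===== PORT A =====
-- bank[i] with Python index semantics (total form; Pre_ keeps every access in range)
def pvGet (s : List Char) (i : Int) : Char := PySem.List.pyGetD s i ' '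

-- loop body of A: 'if bank[i] >= bank[l]: (if bank[l] > bank[r]: r = l); l = i'
def stepA (s : List Char) (lr : Int × Int) (i : Int) : Int × Int :=
  if pvGet s i ≥ pvGet s lr.1 then
    (i, if pvGet s lr.1 > pvGet s lr.2 then lr.1 else lr.2)
  else lr

def max_pair (bank : String) : Int :=
  let s := bank.toList
  let n : Int := PySem.List.len s
  let lr := (PySem.List.pyRange (n - 3) (-1) (-1)).foldl (stepA s) (n - 2, n - 1)
  (PySem.Int.ofChars? [pvGet s lr.1, pvGet s lr.2]).getD 0

-- ===== PORT B =====
-- loop body of B on the current character c = bank[j]: state is (best, maxd); best is the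
-- two-character string maxd + bank[j], compared with Python's string '<' (= '<' on List Char)
def stepB (st : List Char × Char) (c : Char) : List Char × Char :=
  let cand := [st.2, c]
  (if st.1 < cand then cand else st.1, if c > st.2 then c else st.2)

def max_pair_alt (bank : String) : Int :=
  let s := bank.toList
  let n : Int := PySem.List.len s
  let best : List Char := [pvGet s (n - 2), pvGet s (n - 1)]
  let st := (PySem.List.pyRange 1 n 1).foldl (fun st j => stepB st (pvGet s j)) (best, pvGet s 0)
  (PySem.Int.ofChars? st.1).getD 0

-- ===== PRECONDITION & SPEC =====

-- maximum character of a list (used on nonempty lists only; also used below in the proofs)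
def mxl : List Char → Char
  | [] => '0'
  | c :: v => match v with
    | [] => c
    | _ :: _ => max c (mxl v)

-- the two characters the function concatenates and parses: for one character it is doubled;
-- otherwise the maximum character of bank[:-1] (leftmost occurrence, position j) followed by
-- the maximum character of bank[j+1:]
def pvChosen (s : List Char) : Char × Char :=
  match s with
  | [] => (' ', ' ')
  | [c] => (c, c)
  | _ :: _ :: _ =>
      let t := mxl s.dropLast
      let j := s.dropLast.idxOf t
      (t, mxl (s.drop (j + 1)))

def pvIsWs (c : Char) : Bool :=
  c == ' ' || c == '\t' || c == '\n' || c == '\r' || c == (Char.ofNat 11) || c == (Char.ofNat 12)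

-- int(x + y) returns on exactly these two-character strings
def pvParsable2 (x y : Char) : Bool :=
  (pvIsWs x && y.isDigit) || (pvIsWs y && x.isDigit) || (x.isDigit && y.isDigit) ||
    ((x == '+' || x == '-') && y.isDigit)

-- Pre_ is exactly the inputs on which A returns: bank nonempty (otherwise bank[-2] raises
-- IndexError) and the chosen two-character string parses as an int (otherwise ValueError)
def Pre_max_pair (bank : String) : Prop :=
  bank.toList ≠ [] ∧ pvParsable2 (pvChosen bank.toList).1 (pvChosen bank.toList).2 = true
instance (bank : String) : Decidable (Pre_max_pair bank) := by unfold Pre_max_pair; infer_instance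
def pvWitness_max_pair : String := "8914"

def Spec_max_pair (bank : String) (out : Int) : Prop := out = max_pair_alt bank
instance (bank : String) (out : Int) : Decidable (Spec_max_pair bank out) := by unfold Spec_max_pair; infer_instance

-- ===== CLAIM (what is proved, stated in full; the proofs are below) =====
def Claim_equal_max_pair : Prop := ∀ (bank : String), Dom_max_pair bank → Pre_max_pair bank → Spec_max_pair bank (max_pair bank)

-- ===== LEMMAS AND PROOFS =====

-- lexicographic maximum of two character lists, as B's 'if cand > best' keeps it
def pmax (a b : List Char) : List Char := if a < b then b else a

-- best pair value of a list: the lexicographically largest two-character string s[i] + s[j]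
-- over index pairs i < j (junk on lists shorter than 2)
def bp : List Char → List Char
  | [] => []
  | [_] => []
  | a :: b :: v => match v with
    | [] => [a, b]
    | _ :: _ => pmax [a, mxl (b :: v)] (bp (b :: v))

lemma pmax_eq_max (a b : List Char) : pmax a b = max a b := by
  unfold pmax
  rcases lt_trichotomy a b with h | h | h
  · rw [if_pos h, max_eq_right h.le]
  · rw [h, if_neg (lt_irrefl b), max_self]
  · rw [if_neg (not_lt.2 h.le), max_eq_left h.le]

lemma pair_lt_iff (a b c d : Char) : ([a, b] < ([c, d] : List Char)) ↔ a < c ∨ (a = c ∧ b < d) := by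
  constructor
  · intro h
    cases h with
    | rel h => exact Or.inl h
    | cons h =>
        cases h with
        | rel h2 => exact Or.inr ⟨rfl, h2⟩
        | cons h2 => cases h2
  · intro h
    rcases h with h | ⟨rfl, h⟩
    · exact List.Lex.rel h
    · exact List.Lex.cons (List.Lex.rel h)

lemma mxl_cons (c : Char) (v : List Char) (hv : v ≠ []) : mxl (c :: v) = max c (mxl v) := by
  cases v with
  | nil => exact absurd rfl hv
  | cons a w => rfl

lemma bp_cons (a : Char) (v : List Char) (hv : 2 ≤ v.length) :
    bp (a :: v) = pmax [a, mxl v] (bp v) := by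
  cases v with
  | nil => simp at hv
  | cons b w =>
      cases w with
      | nil => simp at hv
      | cons e w' => rfl

-- the one pair-shuffling fact both directions of the proof need:
-- max([m, max(c,x)], [c,x]) = max([m,c], [max(m,c), x]) in the lexicographic order
lemma pair_max_identity (m c x : Char) :
    max ([m, max c x] : List Char) [c, x] = max ([m, c] : List Char) [max m c, x] := by
  rcases lt_trichotomy m c with h | h | h
  · rw [max_eq_right h.le]
    have h1 : ([m, max c x] : List Char) < [c, x] := (pair_lt_iff _ _ _ _).2 (Or.inl h)
    have h2 : ([m, c] : List Char) < [c, x] := (pair_lt_iff _ _ _ _).2 (Or.inl h)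
    rw [max_eq_right h1.le, max_eq_right h2.le]
  · subst h
    rw [max_self]
    have h1 : ¬ ([m, max m x] : List Char) < [m, x] := by
      rw [pair_lt_iff]
      rintro (h | ⟨-, h⟩)
      · exact lt_irrefl m h
      · exact absurd (le_max_right m x) (not_le.2 h)
    rw [max_eq_left (not_lt.1 h1)]
    rcases le_total x m with h2 | h2
    · have h3 : ¬ ([m, m] : List Char) < [m, x] := by
        rw [pair_lt_iff]
        rintro (h | ⟨-, h⟩)
        · exact lt_irrefl m h
        · exact absurd h2 (not_le.2 h)
      rw [max_eq_left (not_lt.1 h3), max_eq_left h2]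
    · have h3 : ([m, m] : List Char) ≤ [m, x] := by
        rcases eq_or_lt_of_le h2 with h4 | h4
        · rw [h4]
        · exact ((pair_lt_iff _ _ _ _).2 (Or.inr ⟨rfl, h4⟩)).le
      rw [max_eq_right h3, max_eq_right h2]
  · rw [max_eq_left h.le]
    have h1 : ¬ ([m, max c x] : List Char) < [c, x] := by
      rw [pair_lt_iff]
      rintro (h2 | ⟨h2, -⟩)
      · exact absurd h (not_lt.2 h2.le)
      · exact absurd h2 (ne_of_gt h)
    rw [max_eq_left (not_lt.1 h1)]
    have h3 : max ([m, c] : List Char) [m, x] = [m, max c x] := by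
      rcases le_total c x with h4 | h4
      · rcases eq_or_lt_of_le h4 with h5 | h5
        · rw [h5]; simp
        · rw [max_eq_right ((pair_lt_iff _ _ _ _).2 (Or.inr ⟨rfl, h5⟩)).le,
            max_eq_right h4]
      · have h5 : ¬ ([m, c] : List Char) < [m, x] := by
          rw [pair_lt_iff]
          rintro (h6 | ⟨-, h6⟩)
          · exact lt_irrefl m h6
          · exact absurd h4 (not_le.2 h6)
        rw [max_eq_left (not_lt.1 h5), max_eq_left h4]
    exact h3.symm

lemma bp_swap (m c : Char) (v : List Char) (hv : v ≠ []) :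
    bp (m :: c :: v) = pmax [m, c] (bp (max m c :: v)) := by
  cases v with
  | nil => exact absurd rfl hv
  | cons x w =>
      cases w with
      | nil =>
          rw [show bp [m, c, x] = pmax [m, max c x] [c, x] from rfl,
            show bp [max m c, x] = [max m c, x] from rfl, pmax_eq_max, pmax_eq_max]
          exact pair_max_identity m c x
      | cons e w' =>
          rw [bp_cons m _ (by simp), bp_cons c _ (by simp),
            bp_cons (max m c) _ (by simp), mxl_cons c _ (by simp)]
          simp only [pmax_eq_max]
          rw [← max_assoc, ← max_assoc, pair_max_identity m c (mxl (x :: e :: w'))]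

lemma bp_last (u : List Char) (p q : Char) : ([p, q] : List Char) ≤ bp (u ++ [p, q]) := by
  induction u with
  | nil => exact le_refl _
  | cons a u ih =>
      have h : (a :: u) ++ [p, q] = a :: (u ++ [p, q]) := rfl
      rw [h, bp_cons a _ (by simp), pmax_eq_max]
      exact le_trans ih (le_max_right _ _)

-- invariant of A's backward scan: v is the suffix processed so far (≥ 2 chars),
-- cl is the maximum of v minus its last char, max cl cr the maximum of v,
-- and [cl, cr] is the best pair value of v
def invA (v : List Char) (cl cr : Char) : Prop :=
  cl = mxl v.dropLast ∧ max cl cr = mxl v ∧ bp v = [cl, cr]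

-- character-level form of stepA (the indices only matter through their characters)
def stepAc (lr : Char × Char) (c : Char) : Char × Char :=
  if c ≥ lr.1 then (c, if lr.1 > lr.2 then lr.1 else lr.2) else lr

lemma invA_step (c : Char) (v : List Char) (h2 : 2 ≤ v.length) (cl cr : Char)
    (hI : invA v cl cr) : invA (c :: v) (stepAc (cl, cr) c).1 (stepAc (cl, cr) c).2 := by
  obtain ⟨hcl, hmax, hbp⟩ := hI
  have hvne : v ≠ [] := by intro e; rw [e] at h2; simp at h2
  have hdlne : v.dropLast ≠ [] := by
    intro e
    have hh := List.length_dropLast (xs := v)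
    rw [e] at hh; simp at hh; omega
  have hifmax : (if cl > cr then cl else cr) = max cl cr := by
    rcases le_or_gt cl cr with h | h
    · simp [not_lt.2 h, max_eq_right h]
    · simp [h, max_eq_left h.le]
  unfold stepAc
  by_cases hc : c ≥ cl
  · simp only [hc, if_true, hifmax]
    refine ⟨?_, ?_, ?_⟩
    · rw [List.dropLast_cons_of_ne_nil hvne, mxl_cons c _ hdlne, ← hcl,
        max_eq_left hc]
    · rw [mxl_cons c _ hvne, ← hmax]
    · rw [bp_cons c _ h2, ← hmax, hbp]
      unfold pmax
      rw [if_neg]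
      rw [pair_lt_iff]
      rintro (h | ⟨-, h⟩)
      · exact absurd hc (not_le.2 h)
      · exact absurd (le_max_right cl cr) (not_le.2 h)
  · simp only [hc, if_false]
    have hle : c ≤ cl := (not_le.1 hc).le
    refine ⟨?_, ?_, ?_⟩
    · rw [List.dropLast_cons_of_ne_nil hvne, mxl_cons c _ hdlne, ← hcl,
        max_eq_right hle]
    · rw [mxl_cons c _ hvne, ← hmax,
        max_eq_right (le_trans hle (le_max_left cl cr))]
    · rw [bp_cons c _ h2, ← hmax, hbp]
      unfold pmax
      rw [if_pos ((pair_lt_iff _ _ _ _).2 (Or.inl (not_le.1 hc)))]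

lemma invA_fold (u v : List Char) (h2 : 2 ≤ v.length) (cl cr : Char) (hI : invA v cl cr) :
    invA (u ++ v) (u.foldr (fun c st => stepAc st c) (cl, cr)).1
      (u.foldr (fun c st => stepAc st c) (cl, cr)).2 := by
  induction u with
  | nil => simpa using hI
  | cons a u ih =>
      have h := invA_step a (u ++ v) (by simp; omega) _ _ ih
      simpa using h

-- A's index fold follows the characters: result of the fold over range(m-1, -1, -1)
-- is a pair of in-range indices whose characters are the char-level fold over (take m).reverse
lemma foldA_chars (s : List Char) (m : Nat) (hm : m ≤ s.length) (l r : Int)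
    (hl : -(s.length : Int) ≤ l ∧ l < s.length) (hr : -(s.length : Int) ≤ r ∧ r < s.length) :
    ∃ l' r', (PySem.List.pyRange ((m : Int) - 1) (-1) (-1)).foldl (stepA s) (l, r) = (l', r') ∧
      (-(s.length : Int) ≤ l' ∧ l' < s.length) ∧ (-(s.length : Int) ≤ r' ∧ r' < s.length) ∧
      ((s.take m).reverse).foldl stepAc (pvGet s l, pvGet s r) = (pvGet s l', pvGet s r') := by
  induction m generalizing l r with
  | zero =>
      rw [show ((0 : Nat) : Int) - 1 = -1 by simp,
        PySem.List.pyRange_neg_one_eq_nil (le_refl (-1))]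
      exact ⟨l, r, rfl, hl, hr, rfl⟩
  | succ m ih =>
      have hm' : m < s.length := by omega
      have hcast : ((m + 1 : Nat) : Int) - 1 = (m : Int) := by push_cast; ring
      rw [hcast, PySem.List.pyRange_neg_one_cons (by omega), List.foldl_cons]
      have hgm : pvGet s ((m : Nat) : Int) = s[m] := by
        unfold pvGet
        rw [PySem.List.pyGetD_natCast, List.getD_eq_getElem s ' ' hm']
      have htake : (s.take (m + 1)).reverse
          = s[m] :: (s.take m).reverse := by
        rw [List.take_add_one, show s[m]? = some s[m] from List.getElem?_eq_getElem hm']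
        simp
      obtain ⟨l₁, r₁, hstep⟩ : ∃ l₁ r₁, stepA s (l, r) ((m : Nat) : Int) = (l₁, r₁) ∧
          (-(s.length : Int) ≤ l₁ ∧ l₁ < s.length) ∧ (-(s.length : Int) ≤ r₁ ∧ r₁ < s.length) ∧
          stepAc (pvGet s l, pvGet s r) s[m] = (pvGet s l₁, pvGet s r₁) := by
        unfold stepA stepAc
        simp only [hgm]
        by_cases hcnd : s[m] ≥ pvGet s l
        · simp only [hcnd, if_true]
          by_cases hcnd2 : pvGet s l > pvGet s r
          · rw [if_pos hcnd2]
            exact ⟨(m : Int), l, rfl, ⟨by omega, by exact_mod_cast hm'⟩, hl, by simp [hcnd2, hgm]⟩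
          · rw [if_neg hcnd2]
            exact ⟨(m : Int), r, rfl, ⟨by omega, by exact_mod_cast hm'⟩, hr, by simp [hcnd2, hgm]⟩
        · simp only [hcnd, if_false]
          exact ⟨l, r, rfl, hl, hr, rfl⟩
      obtain ⟨hstep1, hb1, hb2, hstep2⟩ := hstep
      obtain ⟨l', r', hfold, bl', br', hchars⟩ := ih (by omega) l₁ r₁ hb1 hb2
      refine ⟨l', r', ?_, bl', br', ?_⟩
      · rw [hstep1]; exact hfold
      · rw [htake, List.foldl_cons, hstep2]; exact hchars

-- B's fold returns the lexicographic maximum of best and the best pair value of m :: v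
lemma foldB_eq (v : List Char) (hv : v ≠ []) (m : Char) (best : List Char) :
    (v.foldl stepB (best, m)).1 = pmax best (bp (m :: v)) := by
  induction v generalizing best m with
  | nil => exact absurd rfl hv
  | cons c w ih =>
      have hstep : stepB (best, m) c = (pmax best [m, c], max m c) := by
        unfold stepB pmax
        have e2 : (if c > m then c else m) = max m c := by
          rcases le_or_gt c m with h | h
          · simp [not_lt.2 h, max_eq_left h]
          · simp [h, max_eq_right h.le]
        rw [e2]
      cases w with
      | nil =>
          simp only [List.foldl_cons, List.foldl_nil, hstep]
          show pmax best [m, c] = pmax best (bp [m, c])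
          rfl
      | cons e w' =>
          rw [List.foldl_cons, hstep, ih (by simp) (max m c) _,
            bp_swap m c (e :: w') (by simp)]
          simp only [pmax_eq_max]
          rw [max_assoc]

-- every list of length ≥ 2 is u ++ [p, q]
lemma two_split (s : List Char) (h : 2 ≤ s.length) : ∃ u p q, s = u ++ [p, q] := by
  rcases hs : s.reverse with _ | ⟨q, _ | ⟨p, w⟩⟩
  · rw [← s.reverse_reverse, hs] at h; simp at h
  · rw [← s.reverse_reverse, hs] at h; simp at h
  · refine ⟨w.reverse, p, q, ?_⟩
    have h2 := congrArg List.reverse hs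
    simpa using h2

-- value of A on a string of length ≥ 2: int of the best pair string bp
lemma max_pair_eq_bp (bank : String) (u : List Char) (p q : Char)
    (hs : bank.toList = u ++ [p, q]) :
    max_pair bank = (PySem.Int.ofChars? (bp (u ++ [p, q]))).getD 0 := by
  have hL : (u ++ [p, q]).length = u.length + 2 := by simp
  simp only [max_pair, PySem.List.len_eq, hs]
  have e3 : ((u ++ [p, q]).length : Int) - 3 = ((u.length : Nat) : Int) - 1 := by
    rw [hL]; push_cast; ring
  have e2 : ((u ++ [p, q]).length : Int) - 2 = ((u.length : Nat) : Int) := by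
    rw [hL]; push_cast; ring
  have e1 : ((u ++ [p, q]).length : Int) - 1 = (((u.length + 1) : Nat) : Int) := by
    rw [hL]; push_cast; ring
  rw [e3, e2, e1]
  have hgp : pvGet (u ++ [p, q]) ((u.length : Nat) : Int) = p := by
    unfold pvGet
    rw [PySem.List.pyGetD_natCast, List.getD_eq_getElem _ _ (by simp),
      List.getElem_append_right (le_refl u.length)]
    simp
  have hgq : pvGet (u ++ [p, q]) (((u.length + 1) : Nat) : Int) = q := by
    unfold pvGet
    rw [PySem.List.pyGetD_natCast, List.getD_eq_getElem _ _ (by simp),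
      List.getElem_append_right (by omega : u.length ≤ u.length + 1)]
    simp
  obtain ⟨l', r', hfold, _, _, hchars⟩ :=
    foldA_chars (u ++ [p, q]) u.length (by omega)
      ((u.length : Nat) : Int) (((u.length + 1) : Nat) : Int)
      (by constructor <;> [omega; exact_mod_cast (by omega : u.length < (u ++ [p, q]).length)])
      (by constructor <;> [omega; exact_mod_cast (by omega : u.length + 1 < (u ++ [p, q]).length)])
  rw [hfold]
  rw [hgp, hgq] at hchars
  have htake : (u ++ [p, q]).take u.length = u := List.take_left
  rw [htake, List.foldl_reverse] at hchars
  have hbase : invA [p, q] p q := ⟨rfl, rfl, rfl⟩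
  have hinv := invA_fold u [p, q] (by simp) p q hbase
  rw [hchars] at hinv
  obtain ⟨-, -, hbp⟩ := hinv
  rw [hbp]

-- value of B on a string of length ≥ 2: the same int of bp
lemma max_pair_alt_eq_bp (bank : String) (u : List Char) (p q : Char)
    (hs : bank.toList = u ++ [p, q]) :
    max_pair_alt bank = (PySem.Int.ofChars? (bp (u ++ [p, q]))).getD 0 := by
  have hL : (u ++ [p, q]).length = u.length + 2 := by simp
  simp only [max_pair_alt, PySem.List.len_eq, hs]
  have e2 : ((u ++ [p, q]).length : Int) - 2 = ((u.length : Nat) : Int) := by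
    rw [hL]; push_cast; ring
  have e1 : ((u ++ [p, q]).length : Int) - 1 = (((u.length + 1) : Nat) : Int) := by
    rw [hL]; push_cast; ring
  have hgp : pvGet (u ++ [p, q]) ((u.length : Nat) : Int) = p := by
    unfold pvGet
    rw [PySem.List.pyGetD_natCast, List.getD_eq_getElem _ _ (by simp),
      List.getElem_append_right (le_refl u.length)]
    simp
  have hgq : pvGet (u ++ [p, q]) (((u.length + 1) : Nat) : Int) = q := by
    unfold pvGet
    rw [PySem.List.pyGetD_natCast, List.getD_eq_getElem _ _ (by simp),
      List.getElem_append_right (by omega : u.length ≤ u.length + 1)]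
    simp
  rw [e2, e1, hgp, hgq]
  have hfold := PySem.List.foldl_pyRange_pyGetD' (u ++ [p, q]) ' ' stepB
    ([p, q], pvGet (u ++ [p, q]) 0) (a := 1) (by norm_num)
  have hfun : (fun (st : List Char × Char) j => stepB st (pvGet (u ++ [p, q]) j))
      = (fun (st : List Char × Char) j => stepB st (PySem.List.pyGetD (u ++ [p, q]) j ' ')) := rfl
  rw [hfun, hfold]
  have hle := bp_last u p q
  cases u with
  | nil =>
      have hg0 : pvGet ([] ++ [p, q] : List Char) 0 = p := PySem.List.pyGetD_zero_cons _ _ _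
      rw [hg0, show (([] ++ [p, q] : List Char)).drop (Int.toNat 1) = [q] from rfl,
        foldB_eq [q] (by simp) p _, pmax_eq_max,
        max_eq_right (by simpa using hle)]
      rfl
  | cons a u' =>
      have hg0 : pvGet ((a :: u') ++ [p, q]) 0 = a := PySem.List.pyGetD_zero_cons _ _ _
      rw [hg0, show ((a :: u') ++ [p, q]).drop (Int.toNat 1) = u' ++ [p, q] from rfl,
        foldB_eq (u' ++ [p, q]) (by simp) a _, pmax_eq_max,
        show a :: (u' ++ [p, q]) = (a :: u') ++ [p, q] from rfl,
        max_eq_right hle]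

lemma one_char_eq (bank : String) (c : Char) (hs : bank.toList = [c]) :
    max_pair bank = max_pair_alt bank := by
  simp only [max_pair, max_pair_alt, PySem.List.len_eq, hs, List.length_singleton,
    Nat.cast_one]
  rw [PySem.List.pyRange_neg_one_eq_nil (by norm_num : (1 : Int) - 3 ≤ -1),
    PySem.List.pyRange_one_eq_nil (by norm_num : (1 : Int) ≤ 1)]
  simp

-- ===== VERDICT (by name: the statement is the Claim_ definition above) =====
theorem max_pair_spec : Claim_equal_max_pair := by
  intro bank _ hpre
  unfold Spec_max_pair
  obtain ⟨hne, -⟩ := hpre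
  rcases Nat.lt_or_ge bank.toList.length 2 with h2 | h2
  · have h1 : bank.toList.length = 1 := by
      have : bank.toList.length ≠ 0 := by
        intro e; exact hne (List.length_eq_zero_iff.mp e)
      omega
    obtain ⟨c, hc⟩ := List.length_eq_one_iff.mp h1
    exact one_char_eq bank c hc
  · obtain ⟨u, p, q, hs⟩ := two_split bank.toList h2
    rw [max_pair_eq_bp bank u p q hs, max_pair_alt_eq_bp bank u p q hs]
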